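-- pv_equiv track=rewrite | github.com/ChrisAlexNorman/SytSim | clamping.py | count_clamps
-- ===== SOURCE A (Python) =====
-- def count_clamps(current_state):
--     # Loop through clamps to find how many there are and how many are free.
--     i_clamp = n_free = 0
--     while True:
--         # Collect clamp state names with the clamp index i_clamp
--         clamp_sensor_states = [state_name for state_name in current_state if state_name[-2] == str(i_clamp)]
--         if len(clamp_sensor_states) == 0:
--             # Covered all clamps
--             break
--         if all(state[0] == 'I' for state in clamp_sensor_states):
--             # Clamp is free if all sensor states begin with 'I'.
--             n_free += 1
--         i_clamp += 1
--     n_clamps = i_clamp - 1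
--
--     return n_clamps, n_free
-- ===== SOURCE B (Python) =====
-- def count_clamps(current_state):
--     # One pass: group sensor states by their clamp-index character (name[-2]),
--     # recording for each clamp whether every one of its states starts with 'I'.
--     groups = {}
--     for s in current_state:
--         k = s[-2]
--         groups[k] = groups.get(k, True) and s[0] == 'I'
--     # Walk clamp indices upward until one has no states.
--     i = n_free = 0
--     while str(i) in groups:
--         if groups[str(i)]:
--             n_free += 1
--         i += 1
--     return i - 1, n_free
-- ===== Notes on version B (the rewrite author's own statement) =====
-- stated objective: faster
-- what changed: Replaces the while-loop that re-filters the whole state list for every clamp index with a single grouping pass into a dict (clamp-index char -> all-states-start-with-I flag) followed by O(1) lookups per index.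
import Mathlib
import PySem

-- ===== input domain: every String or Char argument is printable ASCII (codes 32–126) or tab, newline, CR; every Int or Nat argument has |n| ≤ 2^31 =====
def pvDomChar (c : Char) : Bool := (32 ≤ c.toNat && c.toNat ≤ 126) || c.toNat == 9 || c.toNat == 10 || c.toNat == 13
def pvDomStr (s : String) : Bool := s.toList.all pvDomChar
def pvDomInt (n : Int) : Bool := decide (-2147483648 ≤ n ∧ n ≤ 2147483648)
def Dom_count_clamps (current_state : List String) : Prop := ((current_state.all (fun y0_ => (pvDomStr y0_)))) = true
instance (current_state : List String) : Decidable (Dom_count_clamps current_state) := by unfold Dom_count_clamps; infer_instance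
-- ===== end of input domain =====

-- B replaces A's repeated whole-list filtering per clamp index by one grouping
-- pass into a dict plus O(1) lookups (objective: faster by a constant factor).
-- Both Pythons raise IndexError on a state name shorter than 2 chars; Pre_ excludes those.

-- ===== PORT A =====
-- state_name[-2], as the 1-char string Python yields (none-branch "" is unreachable under Pre_)
def pvKeyStr (s : String) : String :=
  match PySem.Str.pyGet? s (-2) with
  | some c => String.ofList [c]
  | none => ""

-- state[0] == 'I' (none-branch false is unreachable under Pre_)
def pvStartsI (s : String) : Bool :=
  match PySem.Str.pyGet? s 0 with
  | some c => c == 'I'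
  | none => false

-- the 'while True' loop of A; fuel 12 always suffices: str(i) for i ≥ 10 has two
-- characters and pvKeyStr is at most one, so the filter is empty by i = 10
def clampLoopA (l : List String) (i nfree : Int) : Nat → Int × Int
  | 0 => (i - 1, nfree)
  | fuel + 1 =>
    let fs := l.filter (fun s => pvKeyStr s == PySem.Int.toStr i)
    if fs.isEmpty then (i - 1, nfree)
    else clampLoopA l (i + 1)
      (if fs.all pvStartsI then nfree + 1 else nfree) fuel

def count_clamps (current_state : List String) : Int × Int :=
  clampLoopA current_state 0 0 12

-- ===== PORT B =====
-- groups[k] = groups.get(k, True) and s[0] == 'I', one pass over the list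
def pvClampGroups (l : List String) : PySem.Dict String Bool :=
  l.foldl (fun d s =>
    d.insert (pvKeyStr s) (d.getD (pvKeyStr s) true && pvStartsI s)) PySem.Dict.empty

-- the 'while str(i) in groups' loop of B; same fuel bound as A's loop
def clampLoopB (d : PySem.Dict String Bool) (i nfree : Int) : Nat → Int × Int
  | 0 => (i - 1, nfree)
  | fuel + 1 =>
    match d.get? (PySem.Int.toStr i) with
    | none => (i - 1, nfree)
    | some b => clampLoopB d (i + 1) (if b then nfree + 1 else nfree) fuel

def count_clamps_alt (current_state : List String) : Int × Int :=
  clampLoopB (pvClampGroups current_state) 0 0 12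

-- ===== PRECONDITION & SPEC =====
-- Pre_ excludes exactly the inputs containing a state name of fewer than 2 characters,
-- on which Python A (and B) raises IndexError at state_name[-2].
def Pre_count_clamps (current_state : List String) : Prop :=
  ∀ s ∈ current_state, 2 ≤ s.length
instance (current_state : List String) : Decidable (Pre_count_clamps current_state) := by
  unfold Pre_count_clamps; infer_instance

def pvWitness_count_clamps : List String := ["I0)", "C1x"]

def Spec_count_clamps (current_state : List String) (out : Int × Int) : Prop := out = count_clamps_alt current_state
instance (current_state : List String) (out : Int × Int) : Decidable (Spec_count_clamps current_state out) := by unfold Spec_count_clamps; infer_instance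

-- ===== CLAIM (what is proved, stated in full; the proofs are below) =====
def Claim_equal_count_clamps : Prop := ∀ (current_state : List String), Dom_count_clamps current_state → Pre_count_clamps current_state → Spec_count_clamps current_state (count_clamps current_state)

-- ===== LEMMAS AND PROOFS =====

-- After the grouping fold, looking up k returns 'none' iff no state has key k,
-- and otherwise the conjunction of pvStartsI over the states with key k.
theorem pvClampGroups_get? (l : List String) (d0 : PySem.Dict String Bool) (k : String) :
    (l.foldl (fun d s =>
      d.insert (pvKeyStr s) (d.getD (pvKeyStr s) true && pvStartsI s)) d0).get? k =
    (let fs := l.filter (fun s => pvKeyStr s == k)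
     if fs.isEmpty then d0.get? k
     else some (d0.getD k true && fs.all pvStartsI)) := by
  induction l generalizing d0 with
  | nil => simp
  | cons s t ih =>
    simp only [List.foldl_cons, List.filter_cons]
    by_cases hk : pvKeyStr s = k
    · subst hk
      rw [ih]
      simp only [beq_self_eq_true, if_pos, List.isEmpty_cons,
        PySem.Dict.get?_insert_self, PySem.Dict.getD_insert_self]
      by_cases he : (t.filter (fun s' => pvKeyStr s' == pvKeyStr s)).isEmpty
      · simp [List.all_cons,
          (List.isEmpty_iff.mp he : t.filter (fun s' => pvKeyStr s' == pvKeyStr s) = [])]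
      · simp [he, List.all_cons, Bool.and_assoc]
    · rw [ih]
      simp [hk, Ne.symm hk, PySem.Dict.get?_insert, PySem.Dict.getD_insert]

-- The two loops agree step by step: A's filter test and B's dict lookup coincide.
theorem clampLoop_eq (l : List String) (fuel : Nat) :
    ∀ (i nfree : Int), clampLoopA l i nfree fuel = clampLoopB (pvClampGroups l) i nfree fuel := by
  induction fuel with
  | zero => intro i nfree; rfl
  | succ f ih =>
    intro i nfree
    simp only [clampLoopA, clampLoopB]
    rw [show pvClampGroups l = l.foldl (fun d s =>
      d.insert (pvKeyStr s) (d.getD (pvKeyStr s) true && pvStartsI s)) PySem.Dict.empty from rfl,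
      pvClampGroups_get? l PySem.Dict.empty (PySem.Int.toStr i)]
    by_cases he : (l.filter (fun s => pvKeyStr s == PySem.Int.toStr i)).isEmpty
    · simp [he]
    · simp [he, ih, pvClampGroups]

-- ===== VERDICT (by name: the statement is the Claim_ definition above) =====
theorem count_clamps_spec : Claim_equal_count_clamps := by
  intro l _ _
  unfold Spec_count_clamps count_clamps count_clamps_alt
  exact clampLoop_eq l 12 0 0
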